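-- pv_equiv track=rewrite | github.com/Sonjeongbeom/AlgorithmOfToday | BJ/그리디/무지의먹방라이브.py | solution
-- ===== SOURCE A (Python) =====
-- def solution(food_times, k):
--     if sum(food_times)<=k:
--         return -1
--
--     arr=[]
--
--     for i,food in enumerate(food_times):
--         arr.append((food,i+1))
--
--     arr.sort()
--
--     length=len(arr)
--
--
--     prev=0
--     for i,food in enumerate(arr):
--         diff=food[0]-prev
--         value=diff*length
--
--         if value<k:
--             prev=food[0]
--             k-=value
--         else:
--             k%=length
--
--             newArr=sorted(arr[i:],key=lambda x:x[1])
--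
--             return newArr[k][1]
--
--         length-=1
--
--     return -1
-- ===== SOURCE B (Python) =====
-- def solution(food_times, k):
--     # binary search for the first sorted position whose full-level consumption reaches k,
--     # then pick among the remaining foods (in original order) by closed-form remainder
--     if not food_times or sum(food_times) <= k:
--         return -1
--     a = sorted(food_times)
--     n = len(a)
--     pre = [0]
--     for f in a:
--         pre.append(pre[-1] + f)
--
--     def consumed(m):
--         # total seconds eaten once every food has been eaten down to level a[m-1]
--         return pre[m] + (n - m) * a[m - 1] if m > 0 else 0
--
--     lo, hi = 0, n - 1
--     while lo < hi:
--         mid = (lo + hi) // 2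
--         if consumed(mid + 1) >= k:
--             hi = mid
--         else:
--             lo = mid + 1
--     t = a[lo]
--     remaining = [i + 1 for i, f in enumerate(food_times) if f >= t]
--     return remaining[(k - consumed(lo)) % len(remaining)]
-- ===== Notes on version B (the rewrite author's own statement) =====
-- stated objective: faster
-- what changed: Replaces A's level-by-level linear consume over the sorted list (with a second sort of the remaining tail) by a prefix-sum table plus a binary search for the first sorted position whose full-level consumption reaches k, then picks the answer among the still-remaining foods in original index order by a closed-form remainder.
import Mathlib
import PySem

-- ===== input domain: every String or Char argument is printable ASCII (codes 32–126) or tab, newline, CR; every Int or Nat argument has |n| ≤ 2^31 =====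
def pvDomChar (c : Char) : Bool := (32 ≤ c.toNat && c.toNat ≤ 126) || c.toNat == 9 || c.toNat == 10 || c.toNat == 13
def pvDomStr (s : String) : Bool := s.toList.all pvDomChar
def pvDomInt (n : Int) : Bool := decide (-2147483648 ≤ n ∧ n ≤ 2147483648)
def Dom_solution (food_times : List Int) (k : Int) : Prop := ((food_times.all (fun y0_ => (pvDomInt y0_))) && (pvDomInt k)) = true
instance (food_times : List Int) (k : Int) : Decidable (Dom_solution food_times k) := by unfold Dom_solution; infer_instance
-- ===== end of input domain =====

-- B replaces A's level-by-level linear consume (plus a re-sort of the tail) by prefix sums,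
-- a binary search for the first sorted position whose cumulative consumption reaches k, and a
-- closed-form remainder over the remaining foods in original order (objective: faster).

-- ===== PORT A =====
-- the 'for i,food in enumerate(arr)' loop with state (prev, k, length); early return inside
def solution_loop (arr : List (Int × Int)) : List (Int × Int) → Int → Int → Int → Int → Int
  | [], _, _, _, _ => -1
  | food :: rest, i, prev, k, length =>
    let diff := food.1 - prev
    let value := diff * length
    if value < k then
      solution_loop arr rest (i + 1) food.1 (k - value) (length - 1)
    else
      let k' := PySem.Int.mod k length
      let newArr := PySem.List.sorted (PySem.List.slice arr (some i) none) (fun x => x.2) false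
      (PySem.List.pyGetD newArr k' ((0 : Int), (0 : Int))).2

def solution (food_times : List Int) (k : Int) : Int :=
  if food_times.sum ≤ k then -1
  else
    let arr := (PySem.List.enumerate food_times 0).foldl
      (fun acc p => acc ++ [(p.2, p.1 + 1)]) []
    -- arr.sort(): Python compares the (food, index) tuples lexicographically
    let arrS := PySem.List.sorted arr (fun p => (toLex p : Int ×ₗ Int)) false
    solution_loop arrS arrS 0 0 k (arrS.length : Int)

-- ===== PORT B =====
-- consumed(m): total seconds eaten once every food is eaten down to level a[m-1]
def solution_alt_consumed (pre a : List Int) (n : Int) (m : Int) : Int :=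
  if m > 0 then PySem.List.pyGetD pre m 0 + (n - m) * PySem.List.pyGetD a (m - 1) 0 else 0

-- the 'while lo < hi' binary search
def solution_alt_search (pre a : List Int) (n k : Int) (lo hi : Int) : Int :=
  if h : lo < hi then
    let mid := PySem.Int.floordiv (lo + hi) 2
    if solution_alt_consumed pre a n (mid + 1) ≥ k then
      solution_alt_search pre a n k lo mid
    else
      solution_alt_search pre a n k (mid + 1) hi
  else lo
termination_by (hi - lo).toNat
decreasing_by
  · have hlt : PySem.Int.floordiv (lo + hi) 2 < hi := by
      rw [PySem.Int.floordiv_lt_iff_lt_mul (by norm_num)]; omega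
    omega
  · have hb := PySem.Int.floordiv_two_mid_bounds (le_of_lt h)
    omega

def solution_alt (food_times : List Int) (k : Int) : Int :=
  if food_times = [] || food_times.sum ≤ k then -1
  else
    let a := PySem.List.sorted food_times (fun x => x) false
    let n : Int := (a.length : Int)
    let pre := a.foldl (fun p f => p ++ [PySem.List.pyGetD p (-1) 0 + f]) [0]
    let lo := solution_alt_search pre a n k 0 (n - 1)
    let t := PySem.List.pyGetD a lo 0
    let remaining := ((PySem.List.enumerate food_times 0).filter (fun p => t ≤ p.2)).map
      (fun p => p.1 + 1)
    PySem.List.pyGetD remaining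
      (PySem.Int.mod (k - solution_alt_consumed pre a n lo) (remaining.length : Int)) 0

-- ===== PRECONDITION & SPEC =====
def Spec_solution (food_times : List Int) (k : Int) (out : Int) : Prop := out = solution_alt food_times k
instance (food_times : List Int) (k : Int) (out : Int) : Decidable (Spec_solution food_times k out) := by unfold Spec_solution; infer_instance

-- ===== CLAIM (what is proved, stated in full; the proofs are below) =====
def Claim_equal_solution : Prop := ∀ (food_times : List Int) (k : Int), Dom_solution food_times k → Spec_solution food_times k (solution food_times k)

-- ===== LEMMAS AND PROOFS =====

-- a[m-1] with a[-1] read as 0: the 'prev' value A's loop carries when it reaches position m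
def pvPrev (a : List Int) (m : Nat) : Int := if m = 0 then 0 else a.getD (m - 1) 0

-- total seconds consumed by A's loop before it looks at sorted position m
def pvC (a : List Int) (m : Nat) : Int :=
  (a.take m).sum + ((a.length : Int) - m) * pvPrev a m

-- first position m ≥ i with k ≤ pvC a (m+1) (the position where A's loop stops)
def pvFirst (a : List Int) (k : Int) (i : Nat) : Option Nat :=
  if i < a.length then
    if k ≤ pvC a (i + 1) then some i else pvFirst a k (i + 1)
  else none
termination_by a.length - i

-- running prefix sums: pvScan c [x1,x2,...] = [c+x1, c+x1+x2, ...] (what B's pre-building loop produces)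
def pvScan (c : Int) : List Int → List Int
  | [] => []
  | x :: xs => (c + x) :: pvScan (c + x) xs

-- ---- pvC basics ----

theorem pvC_zero (a : List Int) : pvC a 0 = 0 := by
  simp [pvC, pvPrev]

theorem pvC_succ (a : List Int) (i : Nat) (hi : i < a.length) :
    pvC a (i + 1) = pvC a i + ((a.length : Int) - i) * (a.getD i 0 - pvPrev a i) := by
  unfold pvC
  rw [List.sum_take_succ a i hi]
  have h1 : pvPrev a (i + 1) = a.getD i 0 := by simp [pvPrev]
  rw [h1, List.getD_eq_getElem a 0 hi]
  push_cast
  ring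

theorem pvC_len (a : List Int) : pvC a a.length = a.sum := by
  unfold pvC
  simp

theorem pvC_mono (a : List Int) (hpa : a.Pairwise (· ≤ ·)) :
    ∀ m1 m2 : Nat, 1 ≤ m1 → m1 ≤ m2 → m2 ≤ a.length → pvC a m1 ≤ pvC a m2 := by
  intro m1 m2 h1 h12
  induction m2, h12 using Nat.le_induction with
  | base => intro _; exact le_refl _
  | succ m hm ih =>
    intro hle
    have hmlt : m < a.length := by omega
    have hprev : pvPrev a m ≤ a.getD m 0 := by
      unfold pvPrev
      rw [if_neg (by omega : ¬ m = 0)]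
      rw [List.getD_eq_getElem a 0 (by omega : m - 1 < a.length), List.getD_eq_getElem a 0 hmlt]
      exact (List.pairwise_iff_getElem.mp hpa) (m - 1) m (by omega) hmlt (by omega)
    have hnm : (0 : Int) ≤ (a.length : Int) - m := by
      have : (m : Int) ≤ (a.length : Int) := by exact_mod_cast le_of_lt hmlt
      omega
    have hstep : pvC a m ≤ pvC a (m + 1) := by
      rw [pvC_succ a m hmlt]
      have := mul_nonneg hnm (sub_nonneg.mpr hprev)
      linarith
    exact le_trans (ih (by omega)) hstep

-- ---- pvFirst characterisation ----

theorem pvFirst_some (a : List Int) (k : Int) (i m : Nat) (h : pvFirst a k i = some m) :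
    i ≤ m ∧ m < a.length ∧ k ≤ pvC a (m + 1) ∧ ∀ j, i ≤ j → j < m → pvC a (j + 1) < k := by
  suffices H : ∀ d i, a.length - i = d → pvFirst a k i = some m →
      i ≤ m ∧ m < a.length ∧ k ≤ pvC a (m + 1) ∧ ∀ j, i ≤ j → j < m → pvC a (j + 1) < k from
    H _ i rfl h
  intro d
  induction d with
  | zero =>
    intro i hd h
    rw [pvFirst, if_neg (by omega : ¬ i < a.length)] at h
    cases h
  | succ d ih =>
    intro i hd h
    have hi : i < a.length := by
      by_contra hni
      rw [pvFirst, if_neg hni] at h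
      cases h
    rw [pvFirst, if_pos hi] at h
    by_cases hk : k ≤ pvC a (i + 1)
    · rw [if_pos hk] at h
      injection h with h
      subst h
      exact ⟨le_refl _, hi, hk, fun j h1 h2 => by omega⟩
    · rw [if_neg hk] at h
      obtain ⟨c1, c2, c3, c4⟩ := ih (i + 1) (by omega) h
      refine ⟨by omega, c2, c3, fun j h1 h2 => ?_⟩
      rcases Nat.eq_or_lt_of_le h1 with rfl | hlt
      · omega
      · exact c4 j (by omega) h2

theorem pvFirst_none (a : List Int) (k : Int) (i : Nat) (h : pvFirst a k i = none) :
    ∀ j, i ≤ j → j < a.length → pvC a (j + 1) < k := by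
  suffices H : ∀ d i, a.length - i = d → pvFirst a k i = none →
      ∀ j, i ≤ j → j < a.length → pvC a (j + 1) < k from H _ i rfl h
  intro d
  induction d with
  | zero => intro i hd h j h1 h2; omega
  | succ d ih =>
    intro i hd h j h1 h2
    rw [pvFirst, if_pos (by omega : i < a.length)] at h
    by_cases hk : k ≤ pvC a (i + 1)
    · rw [if_pos hk] at h; cases h
    · rw [if_neg hk] at h
      rcases Nat.eq_or_lt_of_le h1 with rfl | hlt
      · omega
      · exact ih (i + 1) (by omega) h j (by omega) h2

-- ---- A's loop computes the pvFirst stopping point ----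

theorem loop_eq (arrS : List (Int × Int)) (a : List Int) (ha : a = arrS.map (·.1)) (k : Int) :
    ∀ d i : Nat, arrS.length - i = d → i ≤ arrS.length →
    solution_loop arrS (arrS.drop i) (i : Int) (pvPrev a i) (k - pvC a i) ((arrS.length : Int) - i) =
      (match pvFirst a k i with
       | none => -1
       | some m => (PySem.List.pyGetD (PySem.List.sorted (arrS.drop m) (fun x => x.2) false)
           (PySem.Int.mod (k - pvC a m) ((arrS.length : Int) - m)) ((0 : Int), (0 : Int))).2) := by
  have hlen : a.length = arrS.length := by rw [ha, List.length_map]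
  intro d
  induction d with
  | zero =>
    intro i hd hi
    have hie : i = arrS.length := by omega
    subst hie
    rw [List.drop_length, pvFirst, if_neg (by omega : ¬ arrS.length < a.length)]
    rfl
  | succ d ih =>
    intro i hd hi
    have hilt : i < arrS.length := by omega
    have hget : a.getD i 0 = arrS[i].1 := by
      rw [ha, List.getD_eq_getElem _ _ (by rw [List.length_map]; exact hilt)]
      simp
    have hCs := pvC_succ a i (by omega)
    rw [hlen] at hCs
    rw [pvFirst, if_pos (by omega : i < a.length)]
    by_cases hc : k ≤ pvC a (i + 1)
    · rw [if_pos hc]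
      conv_lhs => rw [List.drop_eq_getElem_cons hilt]
      simp only [solution_loop]
      rw [if_neg (show ¬ (arrS[i].1 - pvPrev a i) * ((arrS.length : Int) - i) < k - pvC a i from by
        rw [← hget, mul_comm]; linarith [hCs])]
      rw [PySem.List.slice_from arrS (by omega : (0 : Int) ≤ (i : Int))]
      rw [show ((i : Int)).toNat = i from by omega]
    · rw [if_neg hc]
      conv_lhs => rw [List.drop_eq_getElem_cons hilt]
      simp only [solution_loop]
      rw [if_pos (show (arrS[i].1 - pvPrev a i) * ((arrS.length : Int) - i) < k - pvC a i from by
        rw [← hget, mul_comm]; linarith [hCs])]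
      have e1 : (i : Int) + 1 = ((i + 1 : Nat) : Int) := by push_cast; ring
      have e3 : k - pvC a i - (arrS[i].1 - pvPrev a i) * ((arrS.length : Int) - i) =
          k - pvC a (i + 1) := by
        rw [← hget, mul_comm]; linarith [hCs]
      have e4 : (arrS.length : Int) - (i : Int) - 1 = (arrS.length : Int) - ((i + 1 : Nat) : Int) := by
        push_cast; ring
      have e2 : arrS[i].1 = pvPrev a (i + 1) := by
        rw [← hget]; simp [pvPrev]
      rw [e1, e3, e4, e2]
      exact ih (i + 1) (by omega) (by omega)

-- ---- B's prefix-sum list ----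

theorem pyGetD_append_neg_one (l : List Int) (v d : Int) :
    PySem.List.pyGetD (l ++ [v]) (-1) d = v := by
  simp [PySem.List.pyGetD, PySem.List.pyGet?, PySem.List.pyIdx?]

theorem foldl_scan : ∀ (xs init : List Int) (c : Int), PySem.List.pyGetD init (-1) 0 = c →
    xs.foldl (fun p f => p ++ [PySem.List.pyGetD p (-1) 0 + f]) init = init ++ pvScan c xs := by
  intro xs
  induction xs with
  | nil => intro init c h; simp [pvScan]
  | cons x xs ih =>
    intro init c h
    simp only [List.foldl_cons]
    rw [h, ih (init ++ [c + x]) (c + x) (pyGetD_append_neg_one _ _ _)]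
    simp [pvScan]

theorem pvScan_getD : ∀ (xs : List Int) (c : Int) (j : Nat), j < xs.length →
    (pvScan c xs).getD j 0 = c + (xs.take (j + 1)).sum := by
  intro xs
  induction xs with
  | nil => intro c j hj; simp at hj
  | cons x xs ih =>
    intro c j hj
    cases j with
    | zero => simp [pvScan]
    | succ j =>
      rw [show pvScan c (x :: xs) = (c + x) :: pvScan (c + x) xs from rfl, List.getD_cons_succ]
      rw [ih (c + x) j (by simpa using hj)]
      simp [List.sum_cons]
      ring

theorem consumed_eq (a : List Int) (m : Int) (h0 : 0 ≤ m) (hn : m ≤ (a.length : Int)) :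
    solution_alt_consumed (0 :: pvScan 0 a) a (a.length : Int) m = pvC a m.toNat := by
  unfold solution_alt_consumed
  by_cases hm : m > 0
  · rw [if_pos hm]
    rw [PySem.List.pyGetD_of_nonneg _ _ (by omega : (0:Int) ≤ m),
        PySem.List.pyGetD_of_nonneg _ _ (by omega : (0:Int) ≤ m - 1)]
    have hmt : m.toNat = (m.toNat - 1) + 1 := by omega
    rw [show (0 :: pvScan 0 a).getD m.toNat 0 = (pvScan 0 a).getD (m.toNat - 1) 0 from by
      rw [hmt]; exact List.getD_cons_succ]
    have hlt : m.toNat - 1 < a.length := by omega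
    rw [pvScan_getD a 0 (m.toNat - 1) hlt]
    unfold pvC pvPrev
    rw [if_neg (by omega : ¬ m.toNat = 0)]
    have e1 : (m - 1).toNat = m.toNat - 1 := by omega
    have e2 : ((m.toNat : Int)) = m := by omega
    rw [e1, ← hmt, e2]
    ring
  · rw [if_neg hm]
    have h : m.toNat = 0 := by omega
    rw [h, pvC_zero]

-- ---- B's binary search finds the least stopping point ----

theorem search_spec (a : List Int) (k : Int) (hpa : a.Pairwise (· ≤ ·)) :
    ∀ d : Nat, ∀ lo hi : Int, (hi - lo).toNat = d → 0 ≤ lo → lo ≤ hi → hi < (a.length : Int) →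
    (∀ j : Int, 0 ≤ j → j < lo →
      solution_alt_consumed (0 :: pvScan 0 a) a (a.length : Int) (j + 1) < k) →
    k ≤ solution_alt_consumed (0 :: pvScan 0 a) a (a.length : Int) (hi + 1) →
    0 ≤ solution_alt_search (0 :: pvScan 0 a) a (a.length : Int) k lo hi ∧
    solution_alt_search (0 :: pvScan 0 a) a (a.length : Int) k lo hi ≤ hi ∧
    k ≤ solution_alt_consumed (0 :: pvScan 0 a) a (a.length : Int)
      (solution_alt_search (0 :: pvScan 0 a) a (a.length : Int) k lo hi + 1) ∧
    ∀ j : Int, 0 ≤ j → j < solution_alt_search (0 :: pvScan 0 a) a (a.length : Int) k lo hi →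
      solution_alt_consumed (0 :: pvScan 0 a) a (a.length : Int) (j + 1) < k := by
  intro d
  induction d using Nat.strong_induction_on with
  | _ d ih =>
  intro lo hi hd h0 hlh hhn hinv hk
  rw [solution_alt_search]
  by_cases hlt : lo < hi
  · have hmb := PySem.Int.floordiv_two_mid_bounds (le_of_lt hlt)
    have hmlt : PySem.Int.floordiv (lo + hi) 2 < hi := by
      rw [PySem.Int.floordiv_lt_iff_lt_mul (by norm_num)]; omega
    simp only [dif_pos hlt]
    by_cases hcond : solution_alt_consumed (0 :: pvScan 0 a) a (a.length : Int)
        (PySem.Int.floordiv (lo + hi) 2 + 1) ≥ k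
    · rw [if_pos hcond]
      obtain ⟨c1, c2, c3, c4⟩ := ih (PySem.Int.floordiv (lo + hi) 2 - lo).toNat (by omega)
        lo (PySem.Int.floordiv (lo + hi) 2) rfl h0 (by omega) (by omega) hinv hcond
      exact ⟨c1, by omega, c3, c4⟩
    · rw [if_neg hcond]
      have hinv' : ∀ j : Int, 0 ≤ j → j < PySem.Int.floordiv (lo + hi) 2 + 1 →
          solution_alt_consumed (0 :: pvScan 0 a) a (a.length : Int) (j + 1) < k := by
        intro j hj0 hjm
        by_cases hjlo : j < lo
        · exact hinv j hj0 hjlo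
        · have hc1 := consumed_eq a (j + 1) (by omega) (by omega)
          have hc2 := consumed_eq a (PySem.Int.floordiv (lo + hi) 2 + 1) (by omega) (by omega)
          have hmono := pvC_mono a hpa (j + 1).toNat (PySem.Int.floordiv (lo + hi) 2 + 1).toNat
            (by omega) (by omega) (by omega)
          omega
      exact ih (hi - (PySem.Int.floordiv (lo + hi) 2 + 1)).toNat (by omega)
        (PySem.Int.floordiv (lo + hi) 2 + 1) hi rfl (by omega) (by omega) hhn hinv' hk
  · simp only [dif_neg hlt]
    have heq : lo = hi := by omega
    subst heq
    exact ⟨h0, le_refl _, hk, hinv⟩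

-- ---- the remaining foods: A's re-sorted tail = B's filtered original order ----

theorem drop_eq_filter (arrS : List (Int × Int)) (m : Nat) (t : Int)
    (hlow : ∀ x ∈ arrS.take m, ¬ (t ≤ x.1)) (hhigh : ∀ x ∈ arrS.drop m, t ≤ x.1) :
    arrS.filter (fun p => decide (t ≤ p.1)) = arrS.drop m := by
  conv_lhs => rw [← List.take_append_drop m arrS]
  rw [List.filter_append]
  rw [List.filter_eq_nil_iff.mpr (by intro x hx; simpa using hlow x hx),
      List.filter_eq_self.mpr (by intro x hx; simpa using hhigh x hx)]
  simp

theorem tail_sorted_eq (L : List Int) (arrS : List (Int × Int)) (m : Nat) (t : Int)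
    (harr : arrS = PySem.List.sorted ((PySem.List.enumerate L 0).map (fun p => (p.2, p.1 + 1)))
      (fun p => (toLex p : Int ×ₗ Int)) false)
    (hlow : ∀ x ∈ arrS.take m, ¬ (t ≤ x.1)) (hhigh : ∀ x ∈ arrS.drop m, t ≤ x.1) :
    PySem.List.sorted (arrS.drop m) (fun x => x.2) false =
      ((PySem.List.enumerate L 0).filter (fun p => decide (t ≤ p.2))).map (fun p => (p.2, p.1 + 1)) := by
  apply PySem.List.sorted_eq_of_perm_of_pairwise_lt
  · have hfm : ((PySem.List.enumerate L 0).filter (fun p => decide (t ≤ p.2))).map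
        (fun p => (p.2, p.1 + 1)) =
        ((PySem.List.enumerate L 0).map (fun p => (p.2, p.1 + 1))).filter
          (fun q => decide (t ≤ q.1)) := by
      rw [List.filter_map]
      rfl
    rw [hfm]
    have hp : arrS.Perm ((PySem.List.enumerate L 0).map (fun p => (p.2, p.1 + 1))) := by
      rw [harr]; exact PySem.List.sorted_perm _ _ _
    have hperm := (hp.filter (fun q => decide (t ≤ q.1))).symm
    rw [drop_eq_filter arrS m t hlow hhigh] at hperm
    exact hperm
  · rw [List.pairwise_map]
    have hpw := List.Pairwise.filter (fun p => decide (t ≤ p.2))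
      (PySem.List.pairwise_lt_enumerate L 0)
    exact hpw.imp (fun {p q} h => by simp only []; omega)

-- ---- the sorted firsts of the lex-sorted pairs are sorted(food_times) ----

theorem firsts_eq (L : List Int) :
    (PySem.List.sorted ((PySem.List.enumerate L 0).map (fun p => (p.2, p.1 + 1)))
        (fun p => (toLex p : Int ×ₗ Int)) false).map (·.1) =
      PySem.List.sorted L (fun x => x) false := by
  symm
  apply PySem.List.sorted_id_eq_of_perm_of_pairwise
  · have h1 := (PySem.List.sorted_perm ((PySem.List.enumerate L 0).map (fun p => (p.2, p.1 + 1)))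
      (fun p => (toLex p : Int ×ₗ Int)) false).map (·.1)
    refine h1.trans ?_
    rw [List.map_map]
    show ((PySem.List.enumerate L 0).map (fun p => p.2)).Perm L
    rw [PySem.List.map_snd_enumerate]
  · rw [List.pairwise_map]
    have h2 := PySem.List.sorted_pairwise ((PySem.List.enumerate L 0).map (fun p => (p.2, p.1 + 1)))
      (fun p => (toLex p : Int ×ₗ Int))
    exact h2.imp (fun {p q} hab => by
      rcases Prod.Lex.le_iff.mp hab with h | ⟨h, _⟩
      · exact le_of_lt h
      · exact le_of_eq h)

theorem solution_spec : Claim_equal_solution := by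
  intro L k _hdom
  unfold Spec_solution
  by_cases hnil : L = []
  · subst hnil
    simp only [solution, solution_alt]
    by_cases hk : List.sum ([] : List Int) ≤ k
    · rw [if_pos hk, if_pos (by simp)]
    · rw [if_neg hk, if_pos (by simp)]
      rfl
  · by_cases hsum : L.sum ≤ k
    · simp only [solution, solution_alt]
      rw [if_pos hsum, if_pos (by simp [hsum])]
    · simp only [solution, solution_alt]
      rw [if_neg hsum, if_neg (by simp [hnil, hsum])]
      rw [PySem.List.foldl_append_singleton_eq_map (fun p => ((p.2 : Int), p.1 + 1))
        (PySem.List.enumerate L 0) []]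
      rw [List.nil_append]
      set arrS := PySem.List.sorted ((PySem.List.enumerate L 0).map (fun p => (p.2, p.1 + 1)))
        (fun p => (toLex p : Int ×ₗ Int)) false with harrS
      set a := PySem.List.sorted L (fun x => x) false with haS
      have ha : a = arrS.map (·.1) := (firsts_eq L).symm
      have hlen : a.length = arrS.length := by rw [ha, List.length_map]
      have hLlen : a.length = L.length := by rw [haS]; exact PySem.List.length_sorted L _ false
      have hn0 : 0 < a.length := by
        rw [hLlen]
        exact List.length_pos_iff.mpr hnil
      have hpa : a.Pairwise (· ≤ ·) := by
        rw [haS]; exact PySem.List.sorted_pairwise L (fun x => x)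
      have hsums : a.sum = L.sum := (PySem.List.sorted_perm L (fun x => x) false).sum_eq
      have hA : solution_loop arrS arrS (0 : Int) 0 k ((arrS.length : Int)) =
          (match pvFirst a k 0 with
           | none => -1
           | some m => (PySem.List.pyGetD (PySem.List.sorted (arrS.drop m) (fun x => x.2) false)
               (PySem.Int.mod (k - pvC a m) ((arrS.length : Int) - m)) ((0 : Int), (0 : Int))).2) := by
        have hle := loop_eq arrS a ha k arrS.length 0 (by omega) (by omega)
        simpa [pvC_zero, pvPrev] using hle
      rw [hA]
      have hpre : List.foldl (fun p f => p ++ [PySem.List.pyGetD p (-1) 0 + f]) [0] a =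
          ((0 : Int) :: pvScan 0 a) := by
        rw [foldl_scan a [0] 0 (by rfl)]
        rfl
      rw [hpre]
      have hklen : k < pvC a a.length := by rw [pvC_len]; omega
      rcases hfirst : pvFirst a k 0 with _ | m
      · exfalso
        have hco := pvFirst_none a k 0 hfirst (a.length - 1) (by omega) (by omega)
        rw [show a.length - 1 + 1 = a.length from by omega] at hco
        omega
      · show (PySem.List.pyGetD (PySem.List.sorted (arrS.drop m) (fun x => x.2) false)
            (PySem.Int.mod (k - pvC a m) ((arrS.length : Int) - (m : Int))) ((0 : Int), (0 : Int))).2 = _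
        obtain ⟨-, hmn, hkm, hleast⟩ := pvFirst_some a k 0 m hfirst
        have hsearch := search_spec a k hpa ((a.length : Int) - 1 - 0).toNat 0
          ((a.length : Int) - 1) rfl (by omega) (by omega) (by omega)
          (by intro j hj0 hjneg; omega)
          (by
            have h1 := consumed_eq a ((a.length : Int) - 1 + 1) (by omega) (by omega)
            rw [show ((a.length : Int) - 1 + 1).toNat = a.length from by omega] at h1
            omega)
        set r := solution_alt_search ((0 : Int) :: pvScan 0 a) a ((a.length : Int)) k 0
          ((a.length : Int) - 1) with hr
        obtain ⟨hr0, hrhi, hrk, hrleast⟩ := hsearch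
        have hrc := consumed_eq a (r + 1) (by omega) (by omega)
        rw [show (r + 1).toNat = r.toNat + 1 from by omega] at hrc
        have hrm : r = (m : Int) := by
          rcases lt_trichotomy r (m : Int) with hlt | heq | hgt
          · exfalso
            have hls := hleast r.toNat (by omega) (by omega)
            omega
          · exact heq
          · exfalso
            have hcm := consumed_eq a ((m : Int) + 1) (by omega) (by omega)
            rw [show ((m : Int) + 1).toNat = m + 1 from by omega] at hcm
            have hcl := hrleast (m : Int) (by omega) hgt
            omega
        rw [hrm]
        have ht : PySem.List.pyGetD a ((m : Int)) 0 = a.getD m 0 := by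
          rw [PySem.List.pyGetD_of_nonneg _ _ (by omega), show ((m : Int)).toNat = m from by omega]
        rw [ht]
        set t := a.getD m 0 with htd
        have hidx : ∀ p q : Nat, p ≤ q → q < a.length → a.getD p 0 ≤ a.getD q 0 := by
          intro p q hpq hq
          rcases Nat.eq_or_lt_of_le hpq with rfl | hpq'
          · exact le_refl _
          · rw [List.getD_eq_getElem a 0 (by omega), List.getD_eq_getElem a 0 hq]
            exact (List.pairwise_iff_getElem.mp hpa) p q (by omega) hq hpq'
        have hprevlt : m = 0 ∨ a.getD (m - 1) 0 < t := by
          by_cases hm0 : m = 0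
          · exact Or.inl hm0
          · right
            by_contra hge
            have heqp : a.getD (m - 1) 0 = t :=
              le_antisymm (hidx (m - 1) m (by omega) hmn) (not_lt.mp hge)
            have hprev : pvPrev a m = t := by unfold pvPrev; rw [if_neg hm0, heqp]
            have hstep := pvC_succ a m hmn
            rw [hprev, ← htd] at hstep
            have h0' : pvC a (m + 1) = pvC a m := by rw [hstep]; ring
            have hls := hleast (m - 1) (by omega) (by omega)
            rw [show m - 1 + 1 = m from by omega] at hls
            omega
        have hlowmem : ∀ x ∈ arrS.take m, ¬ (t ≤ x.1) := by
          intro x hx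
          obtain ⟨j, hj, hxe⟩ := List.mem_take_iff_getElem.mp hx
          have hjm : j < m := lt_of_lt_of_le hj (min_le_left _ _)
          have hjlen : j < a.length := by
            have := lt_of_lt_of_le hj (min_le_right _ _)
            omega
          have hxf : x.1 = a.getD j 0 := by
            rw [← hxe, ha, List.getD_eq_getElem _ _ (by rw [List.length_map]; omega)]
            simp
          have hjt : a.getD j 0 < t := by
            rcases hprevlt with hm0 | hlt'
            · omega
            · exact lt_of_le_of_lt (hidx j (m - 1) (by omega) (by omega)) hlt'
          rw [hxf]
          omega
        have hhighmem : ∀ x ∈ arrS.drop m, t ≤ x.1 := by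
          intro x hx
          obtain ⟨j, hj, hxe⟩ := List.mem_iff_getElem.mp hx
          have hmj : m + j < a.length := by
            rw [List.length_drop] at hj
            omega
          have hxf : x.1 = a.getD (m + j) 0 := by
            rw [← hxe, List.getElem_drop, ha,
              List.getD_eq_getElem _ _ (by rw [List.length_map]; omega)]
            simp
          rw [hxf]
          exact hidx m (m + j) (by omega) hmj
        have hsortEq := tail_sorted_eq L arrS m t harrS hlowmem hhighmem
        rw [hsortEq]
        set F := (PySem.List.enumerate L 0).filter (fun p => decide (t ≤ p.2)) with hF
        have hFlen : F.length = a.length - m := by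
          have h1 : (F.map (fun p => (p.2, p.1 + 1))).length =
              (PySem.List.sorted (arrS.drop m) (fun x => x.2) false).length := by rw [hsortEq]
          rw [List.length_map, PySem.List.length_sorted, List.length_drop, ← hlen] at h1
          exact h1
        have hcm2 : solution_alt_consumed ((0 : Int) :: pvScan 0 a) a ((a.length : Int)) ((m : Int)) =
            pvC a m := by
          rw [consumed_eq a ((m : Int)) (by omega) (by omega),
            show ((m : Int)).toNat = m from by omega]
        rw [hcm2]
        have hmodeq : (((F.map (fun p => p.1 + 1)).length : Nat) : Int) =
            (a.length : Int) - (m : Int) := by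
          rw [List.length_map, hFlen]; omega
        rw [hmodeq]
        rw [show ((arrS.length : Nat) : Int) = ((a.length : Nat) : Int) from by rw [hlen]]
        set kq := PySem.Int.mod (k - pvC a m) ((a.length : Int) - (m : Int)) with hkq
        have hq0 : 0 ≤ kq := PySem.Int.mod_nonneg _ (by omega)
        have hqlt : kq < (a.length : Int) - (m : Int) := PySem.Int.mod_lt _ (by omega)
        rw [PySem.List.pyGetD_of_nonneg _ _ hq0, PySem.List.pyGetD_of_nonneg _ _ hq0]
        have hqlen : kq.toNat < F.length := by omega
        rw [List.getD_eq_getElem _ _ (by rw [List.length_map]; exact hqlen),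
          List.getD_eq_getElem _ _ (by rw [List.length_map]; exact hqlen)]
        simp
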